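-- pv_equiv track=rewrite | github.com/OriHoch/dataflows-shell | dataflows_shell/cli.py | get_short_arg_key_value
-- ===== SOURCE A (Python) =====
-- def get_short_arg_key_value(arg):
--     for short, long in {'d': 'dump',
--                         'l': 'load',
--                         'a': 'args',
--                         'k': 'kwargs',
--                         'f': 'print-fields',
--                         'o': 'print-format',}.items():
--         if arg.startswith(f'-{short}='):
--             key = long
--             value = '='.join(arg.split('=')[1:])
--             return key, value
--     return None, None
-- ===== SOURCE B (Python) =====
-- SHORT_TO_LONG = {'d': 'dump', 'l': 'load', 'a': 'args', 'k': 'kwargs',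
--                  'f': 'print-fields', 'o': 'print-format'}
--
--
-- def get_short_arg_key_value(arg):
--     parts = arg.split('=')
--     head = parts[0]
--     if len(parts) > 1 and len(head) == 2 and head[0] == '-' and head[1] in SHORT_TO_LONG:
--         return SHORT_TO_LONG[head[1]], '='.join(parts[1:])
--     return None, None
-- ===== Notes on version B (the rewrite author's own statement) =====
-- stated objective: simpler
-- what changed: B splits the argument once at the separator and does a single direct dict lookup on the short-option letter, instead of A's loop over all six short->long pairs testing a prefix for each.
import Mathlib
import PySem

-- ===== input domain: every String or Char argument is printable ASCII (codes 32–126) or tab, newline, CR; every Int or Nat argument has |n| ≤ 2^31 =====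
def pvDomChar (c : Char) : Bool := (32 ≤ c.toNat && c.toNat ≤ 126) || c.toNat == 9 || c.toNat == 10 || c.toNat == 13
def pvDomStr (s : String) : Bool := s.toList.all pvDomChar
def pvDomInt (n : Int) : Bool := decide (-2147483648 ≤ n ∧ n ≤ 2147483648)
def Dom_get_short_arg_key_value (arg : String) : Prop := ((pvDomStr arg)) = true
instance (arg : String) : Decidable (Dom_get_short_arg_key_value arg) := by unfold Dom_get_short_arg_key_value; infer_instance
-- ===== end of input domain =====

-- B replaces A's loop over all six short→long pairs (a startswith test per pair) by one split
-- of the argument and a single direct dict lookup on the letter; objective: simpler.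


-- ===== PORT A =====
-- the dict literal of A (and the short→long mapping of B)
def pvShortLongDict : PySem.Dict Char String :=
  ⟨[('d', "dump"), ('l', "load"), ('a', "args"), ('k', "kwargs"),
    ('f', "print-fields"), ('o', "print-format")]⟩

-- A's for-loop over the dict items
def pvLoopA (arg : String) : List (Char × String) → Option String × Option String
  | [] => (none, none)
  | (short, long) :: restItems =>
    if PySem.Str.startswith arg (String.ofList ['-', short, '=']) then
      (some long,
       some (PySem.Str.join "="
         (PySem.List.slice ((PySem.Chars.splitOn arg.toList ['=']).map String.ofList) (some 1) none)))
    else pvLoopA arg restItems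

def get_short_arg_key_value (arg : String) : Option String × Option String :=
  pvLoopA arg pvShortLongDict.items

-- ===== PORT B =====
def get_short_arg_key_value_alt (arg : String) : Option String × Option String :=
  let parts := (PySem.Chars.splitOn arg.toList ['=']).map String.ofList
  let head := parts.headD ""          -- parts[0]; split always returns a non-empty list
  let c := (PySem.Str.pyGet? head 1).getD ' '   -- head[1]; in range whenever the guard holds
  if parts.length > 1 ∧ PySem.Str.len head = 2 ∧ PySem.Str.pyGet? head 0 = some '-'
      ∧ pvShortLongDict.contains c = true then
    (pvShortLongDict.get? c,
     some (PySem.Str.join "=" (PySem.List.slice parts (some 1) none)))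
  else (none, none)

-- ===== PRECONDITION & SPEC =====
def Spec_get_short_arg_key_value (arg : String) (out : Option String × Option String) : Prop := out = get_short_arg_key_value_alt arg
instance (arg : String) (out : Option String × Option String) : Decidable (Spec_get_short_arg_key_value arg out) := by unfold Spec_get_short_arg_key_value; infer_instance

-- ===== CLAIM (what is proved, stated in full; the proofs are below) =====
def Claim_equal_get_short_arg_key_value : Prop := ∀ (arg : String), Dom_get_short_arg_key_value arg → Spec_get_short_arg_key_value arg (get_short_arg_key_value arg)

-- ===== LEMMAS AND PROOFS =====
set_option maxRecDepth 8000
set_option maxHeartbeats 1000000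

-- reference splitting function (proofs only)
def pvSplit : List Char → List (List Char)
  | [] => [[]]
  | c :: rest =>
    if c = '=' then [] :: pvSplit rest
    else match pvSplit rest with
         | h :: t => (c :: h) :: t
         | [] => [[c]]

theorem pvSplit_ne_nil (l : List Char) : pvSplit l ≠ [] := by
  cases l with
  | nil => simp [pvSplit]
  | cons c rest =>
    simp only [pvSplit]
    split <;> [simp; (split <;> simp)]

theorem pvSplit_head_tail (l : List Char) :
    ∃ t, pvSplit l = (l.takeWhile (fun c => !(c == '='))) :: t ∧ (t = [] ↔ ('=' ∉ l)) := by
  induction l with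
  | nil => exact ⟨[], by simp [pvSplit]⟩
  | cons c rest ih =>
    obtain ⟨t, ht, hmem⟩ := ih
    by_cases hc : c = '='
    · subst hc
      refine ⟨pvSplit rest, ?_, ?_⟩
      · simp [pvSplit, List.takeWhile_cons]
      · simpa using pvSplit_ne_nil rest
    · refine ⟨t, ?_, ?_⟩
      · simp [pvSplit, hc, ht, List.takeWhile_cons]
      · simp [hmem, List.mem_cons, Ne.symm hc]

theorem pvSplitOn_go_eq : ∀ (fuel : Nat) (l cur : List Char) (acc : List (List Char)),
    l.length < fuel →
    PySem.Chars.splitOn.go ['='] fuel l cur acc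
      = acc.reverse ++ (pvSplit l).modifyHead (cur.reverse ++ ·) := by
  intro fuel
  induction fuel with
  | zero => intro l cur acc h; omega
  | succ n ih =>
    intro l cur acc h
    cases l with
    | nil => simp [PySem.Chars.splitOn.go, pvSplit]
    | cons c rest =>
      by_cases hc : c = '='
      · subst hc
        have : PySem.Chars.splitOn.go ['='] (n+1) ('=' :: rest) cur acc
            = PySem.Chars.splitOn.go ['='] n rest [] (cur.reverse :: acc) := by
          simp [PySem.Chars.splitOn.go, List.isPrefixOf]
        rw [this, ih rest [] (cur.reverse :: acc) (by simpa using Nat.lt_of_succ_lt_succ h)]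
        obtain ⟨t, ht, -⟩ := pvSplit_head_tail rest
        simp [pvSplit, ht]
      · have : PySem.Chars.splitOn.go ['='] (n+1) (c :: rest) cur acc
            = PySem.Chars.splitOn.go ['='] n rest (c :: cur) acc := by
          simp [PySem.Chars.splitOn.go, List.isPrefixOf, Ne.symm hc]
        rw [this, ih rest (c :: cur) acc (by simpa using Nat.lt_of_succ_lt_succ h)]
        obtain ⟨t, ht, -⟩ := pvSplit_head_tail rest
        simp [pvSplit, hc, ht]

theorem pvSplitOn_eq (l : List Char) : PySem.Chars.splitOn l ['='] = pvSplit l := by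
  rw [PySem.Chars.splitOn, pvSplitOn_go_eq (l.length + 1) l [] [] (Nat.lt_succ_self _)]
  obtain ⟨t, ht, -⟩ := pvSplit_head_tail l
  simp [ht]

-- the inputs on which the loop of A fires
def pvHit (l : List Char) : Prop :=
  ∃ c rest, l = '-' :: c :: '=' :: rest ∧ pvShortLongDict.contains c = true

theorem pvContains_cases {c : Char} (h : pvShortLongDict.contains c = true) :
    c = 'd' ∨ c = 'l' ∨ c = 'a' ∨ c = 'k' ∨ c = 'f' ∨ c = 'o' := by
  simp [pvShortLongDict, PySem.Dict.contains, PySem.Dict.get?, List.find?] at h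
  rcases h with h | h | h | h | h | h <;> simp [h.symm]

theorem pvContains_ne_eq {c : Char} (h : pvShortLongDict.contains c = true) : c ≠ '=' := by
  rcases pvContains_cases h with h | h | h | h | h | h <;> subst h <;> decide

theorem pvStartswith_shape {s : String} {k : Char}
    (h : PySem.Str.startswith s (String.ofList ['-', k, '=']) = true) :
    ∃ rest, s.toList = '-' :: k :: '=' :: rest := by
  have h' : PySem.Chars.startswith s.toList ['-', k, '='] = true := by
    simpa using h
  rw [PySem.Chars.startswith_iff] at h'
  obtain ⟨t, ht⟩ := h'
  exact ⟨t, ht.symm⟩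

theorem pvA_miss {s : String} (h : ¬ pvHit s.toList) :
    get_short_arg_key_value s = (none, none) := by
  unfold get_short_arg_key_value pvShortLongDict
  simp only [pvLoopA]
  split_ifs with h1 h2 h3 h4 h5 h6 <;> try rfl
  all_goals {
    exfalso; apply h
    first
    | exact (pvStartswith_shape h1).elim (fun r hr => ⟨_, r, hr, by decide⟩)
    | exact (pvStartswith_shape h2).elim (fun r hr => ⟨_, r, hr, by decide⟩)
    | exact (pvStartswith_shape h3).elim (fun r hr => ⟨_, r, hr, by decide⟩)
    | exact (pvStartswith_shape h4).elim (fun r hr => ⟨_, r, hr, by decide⟩)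
    | exact (pvStartswith_shape h5).elim (fun r hr => ⟨_, r, hr, by decide⟩)
    | exact (pvStartswith_shape h6).elim (fun r hr => ⟨_, r, hr, by decide⟩) }

theorem pvA_hit {s : String} {c : Char} {rest : List Char}
    (hl : s.toList = '-' :: c :: '=' :: rest) (hc : pvShortLongDict.contains c = true) :
    get_short_arg_key_value s
      = (pvShortLongDict.get? c,
         some (PySem.Str.join "="
           (PySem.List.slice ((PySem.Chars.splitOn s.toList ['=']).map String.ofList) (some 1) none))) := by
  unfold get_short_arg_key_value pvShortLongDict
  rcases pvContains_cases hc with h | h | h | h | h | h <;> subst h <;>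
    simp [pvLoopA, PySem.Chars.startswith, hl, List.isPrefixOf, PySem.Dict.get?, List.find?]

theorem pvTakeWhile_two {l : List Char} {x y : Char}
    (h : l.takeWhile (fun c => !(c == '=')) = [x, y]) (hmem : '=' ∈ l) :
    ∃ rest, l = x :: y :: '=' :: rest := by
  match l with
  | [] => simp at h
  | [a] =>
    by_cases ha : a = '=' <;> simp [List.takeWhile_cons, ha] at h
  | a :: b :: l' =>
    by_cases ha : a = '='
    · simp [List.takeWhile_cons, ha] at h
    by_cases hb : b = '='
    · simp [List.takeWhile_cons, ha, hb] at h
    simp only [List.takeWhile_cons, ha, hb, beq_iff_eq, if_neg, Bool.not_eq_true',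
      decide_eq_true_eq, if_true, decide_not] at h
    rw [if_pos (by simpa using ha), if_pos (by simpa using hb)] at h
    simp only [List.cons.injEq] at h
    obtain ⟨hax, hby, htail⟩ := h
    subst hax; subst hby
    cases l' with
    | nil => simp [ha, hb] at hmem; exact absurd hmem (by tauto)
    | cons z l'' =>
      by_cases hz : z = '='
      · exact ⟨l'', by rw [hz]⟩
      · rw [List.takeWhile_cons, if_pos (by simpa using hz)] at htail
        simp at htail

theorem pvB_hit {s : String} {c : Char} {rest : List Char}
    (hl : s.toList = '-' :: c :: '=' :: rest) (hc : pvShortLongDict.contains c = true) :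
    get_short_arg_key_value_alt s
      = (pvShortLongDict.get? c,
         some (PySem.Str.join "="
           (PySem.List.slice ((PySem.Chars.splitOn s.toList ['=']).map String.ofList) (some 1) none))) := by
  have hcne : c ≠ '=' := pvContains_ne_eq hc
  have htw : s.toList.takeWhile (fun c => !(c == '=')) = ['-', c] := by
    rw [hl]; simp [List.takeWhile_cons, hcne]
  obtain ⟨t, ht, hmem⟩ := pvSplit_head_tail s.toList
  have htne : t ≠ [] := by
    rw [← not_iff_not] at hmem
    exact hmem.mpr (by rw [hl]; simp)
  unfold get_short_arg_key_value_alt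
  rw [pvSplitOn_eq, ht, htw]
  rw [if_pos ?_]
  · congr 2
    simp [PySem.Str.pyGet?]
  · refine ⟨?_, ?_, ?_, ?_⟩
    · cases t with
      | nil => exact absurd rfl htne
      | cons _ _ => simp
    · simp [PySem.Str.len, PySem.Chars.len]
    · simp [PySem.Str.pyGet?]
    · simpa [PySem.Str.pyGet?] using hc

theorem pvB_miss {s : String} (h : ¬ pvHit s.toList) :
    get_short_arg_key_value_alt s = (none, none) := by
  unfold get_short_arg_key_value_alt
  rw [if_neg]
  rintro ⟨hlen, hlen2, hget0, hcont⟩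
  apply h
  obtain ⟨t, ht, hmem⟩ := pvSplit_head_tail s.toList
  rw [pvSplitOn_eq, ht] at hlen hlen2 hget0 hcont
  have htne : t ≠ [] := by
    intro he
    rw [he] at hlen
    simp at hlen
  have hmem' : '=' ∈ s.toList := by
    by_contra hno
    exact htne (hmem.mpr hno)
  match hw : s.toList.takeWhile (fun c => !(c == '=')) with
  | [] =>
    rw [hw] at hlen2; simp [PySem.Str.len, PySem.Chars.len] at hlen2
  | [x] =>
    rw [hw] at hlen2; simp [PySem.Str.len, PySem.Chars.len] at hlen2
  | x :: y :: z :: w =>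
    rw [hw] at hlen2; simp [PySem.Str.len, PySem.Chars.len] at hlen2; omega
  | [x, y] =>
    rw [hw] at hget0 hcont
    have hx : x = '-' := by
      simpa [PySem.Str.pyGet?] using hget0
    have hcy : pvShortLongDict.contains y = true := by
      simpa [PySem.Str.pyGet?] using hcont
    obtain ⟨r, hr⟩ := pvTakeWhile_two hw hmem'
    exact ⟨y, r, by rw [hr, hx], hcy⟩

-- ===== VERDICT (by name: the statement is the Claim_ definition above) =====
theorem get_short_arg_key_value_spec : Claim_equal_get_short_arg_key_value := by
  intro arg _
  unfold Spec_get_short_arg_key_value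
  by_cases h : pvHit arg.toList
  · obtain ⟨c, rest, hl, hc⟩ := h
    rw [pvA_hit hl hc, pvB_hit hl hc]
  · rw [pvA_miss h, pvB_miss h]
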